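-- pv_equiv track=rewrite | github.com/yizhou0522/Selected-Coursework | cs540/cs540-master/test.py | f
-- ===== SOURCE A (Python) =====
-- def f(state):
--     """ calculates the f value of state """
--     hits = []  # stores all columns that have a queen that can be attacked
--     # check rows
--     for col in range(len(state)):
--         # iterates through subsequent columns
--         for next_queen in range(col + 1, len(state)):
--             cq, tq = state[col], state[next_queen]  # cq = queen in column col, tq = queen in subsequent columns
--             # checks if two queens in column col and next_queen can attack each other from rows
--             if cq == tq:
--                 if col not in hits:
--                     hits.append(col)
--                 if next_queen not in hits:
--                     hits.append(next_queen)
--                 break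
--
--     # check diagonal
--     for col in range(len(state)):
--         # iterates through subsequent columns
--         for next_queen in range(col + 1, len(state)):
--             cq, tq = state[col], state[next_queen]  # cq = queen in column col, tq = queen in subsequent columns
--             # checks if two queens in column col and next_queen can attack each other from diagonals
--             if col + cq == next_queen + tq or col - cq == next_queen - tq:
--                 if col not in hits:
--                     hits.append(col)
--                 if next_queen not in hits:
--                     hits.append(next_queen)
--     # length of hits = the f value of the state
--     return len(hits)
-- ===== SOURCE B (Python) =====
-- def f(state):
--     """ calculates the f value of state """
--     # one pass: count how many queens share each row, each diagonal and each
--     # anti-diagonal; a column is attackable iff any of its three groups has size >= 2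
--     rows, diag, anti = {}, {}, {}
--     for i, v in enumerate(state):
--         rows[v] = rows.get(v, 0) + 1
--         anti[i + v] = anti.get(i + v, 0) + 1
--         diag[i - v] = diag.get(i - v, 0) + 1
--     return sum(1 for i, v in enumerate(state)
--                if rows[v] > 1 or anti[i + v] > 1 or diag[i - v] > 1)
-- ===== Notes on version B (the rewrite author's own statement) =====
-- stated objective: faster
-- what changed: Replaced A's two quadratic pairwise scans (with list-membership tests on the hits list) by a single pass that counts queens per row, diagonal and anti-diagonal in three dictionaries and then counts the columns whose row/diagonal/anti-diagonal group has size >= 2.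
import Mathlib
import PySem

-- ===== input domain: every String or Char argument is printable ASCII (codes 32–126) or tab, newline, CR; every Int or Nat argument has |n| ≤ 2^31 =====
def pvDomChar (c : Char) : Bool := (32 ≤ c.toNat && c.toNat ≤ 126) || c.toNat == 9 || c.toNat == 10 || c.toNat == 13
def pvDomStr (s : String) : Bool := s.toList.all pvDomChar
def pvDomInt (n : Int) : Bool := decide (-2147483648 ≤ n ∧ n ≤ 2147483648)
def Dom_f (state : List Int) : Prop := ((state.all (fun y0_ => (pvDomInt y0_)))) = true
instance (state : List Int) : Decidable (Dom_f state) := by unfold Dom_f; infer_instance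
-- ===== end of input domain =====

-- B replaces A's quadratic pairwise scans by one dictionary-counting pass over rows/diagonals/anti-diagonals (asymptotically faster); same return value on every input.

-- ===== PORT A =====
-- appending col (if absent) then j (if absent) to hits — the duplicated 'not in hits: append' block of A
def pvAdd2 (hits : List Int) (col j : Int) : List Int :=
  let h1 := if col ∈ hits then hits else hits ++ [col]
  if j ∈ h1 then h1 else h1 ++ [j]

-- A's inner row loop over js (the remaining next_queen values), with break on the first equal pair
def pvRowInner (state : List Int) (col : Int) (js : List Int) (hits : List Int) : List Int :=
  match js with
  | [] => hits
  | j :: rest =>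
      if PySem.List.pyGetD state col 0 = PySem.List.pyGetD state j 0
      then pvAdd2 hits col j   -- break
      else pvRowInner state col rest hits

-- A's inner diagonal loop over js (no break)
def pvDiagInner (state : List Int) (col : Int) (js : List Int) (hits : List Int) : List Int :=
  match js with
  | [] => hits
  | j :: rest =>
      let cq := PySem.List.pyGetD state col 0
      let tq := PySem.List.pyGetD state j 0
      if col + cq = j + tq ∨ col - cq = j - tq
      then pvDiagInner state col rest (pvAdd2 hits col j)
      else pvDiagInner state col rest hits

def f (state : List Int) : Int :=
  let n : Int := state.length
  let hits1 := (PySem.List.pyRange 0 n 1).foldl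
      (fun hits col => pvRowInner state col (PySem.List.pyRange (col + 1) n 1) hits) []
  let hits2 := (PySem.List.pyRange 0 n 1).foldl
      (fun hits col => pvDiagInner state col (PySem.List.pyRange (col + 1) n 1) hits) hits1
  (hits2.length : Int)

-- ===== PORT B =====
def f_alt (state : List Int) : Int :=
  let e := PySem.List.enumerate state 0
  -- one pass building the three counting dicts rows / anti / diag
  let cs := e.foldl
      (fun acc p =>
        (acc.1.insert p.2 (acc.1.getD p.2 0 + 1),
         acc.2.1.insert (p.1 + p.2) (acc.2.1.getD (p.1 + p.2) 0 + 1),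
         acc.2.2.insert (p.1 - p.2) (acc.2.2.getD (p.1 - p.2) 0 + 1)))
      ((PySem.Dict.empty : PySem.Dict Int Int),
       (PySem.Dict.empty : PySem.Dict Int Int),
       (PySem.Dict.empty : PySem.Dict Int Int))
  -- sum(1 for i, v in enumerate(state) if rows[v] > 1 or anti[i+v] > 1 or diag[i-v] > 1)
  e.foldl
      (fun s p =>
        if 1 < cs.1.getD p.2 0 ∨ 1 < cs.2.1.getD (p.1 + p.2) 0 ∨ 1 < cs.2.2.getD (p.1 - p.2) 0
        then s + 1 else s) 0

-- ===== PRECONDITION & SPEC =====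
def Spec_f (state : List Int) (out : Int) : Prop := out = f_alt state
instance (state : List Int) (out : Int) : Decidable (Spec_f state out) := by unfold Spec_f; infer_instance

-- ===== CLAIM (what is proved, stated in full; the proofs are below) =====
def Claim_equal_f : Prop := ∀ (state : List Int), Dom_f state → Spec_f state (f state)

-- ===== LEMMAS AND PROOFS =====

-- the anti-diagonal keys i + state[i] and the diagonal keys i - state[i]
def pvK (state : List Int) : List Int := (PySem.List.enumerate state 0).map (fun p => p.1 + p.2)
def pvK' (state : List Int) : List Int := (PySem.List.enumerate state 0).map (fun p => p.1 - p.2)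

-- the common predicate: column p.1 (with queen p.2) is attackable
def pvPredp (state : List Int) (p : Int × Int) : Bool :=
  decide (2 ≤ state.count p.2) || decide (2 ≤ (pvK state).count (p.1 + p.2))
    || decide (2 ≤ (pvK' state).count (p.1 - p.2))

-- ---- generic list facts ----
theorem pv_foldl_mem_iff {β : Type} (g : List Int → β → List Int) (A : β → Int → Prop)
    (h : ∀ acc c x, x ∈ g acc c ↔ x ∈ acc ∨ A c x) (l : List β) (acc : List Int) (x : Int) :
    x ∈ l.foldl g acc ↔ x ∈ acc ∨ ∃ c ∈ l, A c x := by
  induction l generalizing acc with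
  | nil => simp
  | cons c rest ih =>
      simp only [List.foldl_cons, ih, h, List.mem_cons]
      constructor
      · rintro ((hx | hx) | ⟨c', hc', hA⟩)
        · exact Or.inl hx
        · exact Or.inr ⟨c, Or.inl rfl, hx⟩
        · exact Or.inr ⟨c', Or.inr hc', hA⟩
      · rintro (hx | ⟨c', hc' | hc', hA⟩)
        · exact Or.inl (Or.inl hx)
        · exact Or.inl (Or.inr (hc' ▸ hA))
        · exact Or.inr ⟨c', hc', hA⟩

theorem pv_foldl_nodup {β : Type} (g : List Int → β → List Int)
    (h : ∀ acc c, acc.Nodup → (g acc c).Nodup) (l : List β) (acc : List Int)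
    (ha : acc.Nodup) : (l.foldl g acc).Nodup := by
  induction l generalizing acc with
  | nil => simpa
  | cons c rest ih => exact ih _ (h _ _ ha)

theorem pv_find?_eq_of_unique {p : Int → Bool} {l : List Int} {x : Int}
    (hx : x ∈ l) (hpx : p x = true) (hu : ∀ y ∈ l, p y = true → y = x) :
    l.find? p = some x := by
  induction l with
  | nil => simp at hx
  | cons a rest ih =>
      by_cases hpa : p a = true
      · have hax : a = x := hu a (by simp) hpa
        subst hax
        simp [List.find?_cons, hpa]
      · have hx' : x ∈ rest := by
          rcases List.mem_cons.mp hx with h | h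
          · exact absurd (h ▸ hpx) hpa
          · exact h
        simp [List.find?_cons, hpa,
          ih hx' (fun y hy hpy => hu y (List.mem_cons_of_mem _ hy) hpy)]

theorem pv_two_le_count_iff (l : List Int) (i : Nat) (hi : i < l.length) :
    2 ≤ l.count l[i] ↔ ∃ j, ∃ hj : j < l.length, j ≠ i ∧ l[j] = l[i] := by
  rw [← List.mem_eraseIdx_iff_getElem]
  rw [(List.getElem_cons_eraseIdx_perm hi).symm.count_eq]
  rw [← List.count_pos_iff]
  simp

theorem pv_mem_enumerate {α : Type} (xs : List α) (s : Int) (p : Int × α) :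
    p ∈ PySem.List.enumerate xs s ↔ ∃ k : Nat, ∃ hk : k < xs.length, p.1 = s + k ∧ p.2 = xs[k] := by
  induction xs generalizing s with
  | nil => simp [PySem.List.enumerate_nil]
  | cons a rest ih =>
      simp only [PySem.List.enumerate_cons, List.mem_cons, ih]
      constructor
      · rintro (rfl | ⟨k, hk, h1, h2⟩)
        · exact ⟨0, by simp, by simp, by simp⟩
        · exact ⟨k + 1, by simp only [List.length_cons]; omega, by rw [h1]; push_cast; ring, by simpa using h2⟩
      · rintro ⟨k, hk, h1, h2⟩
        cases k with
        | zero =>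
            left
            have : p.1 = s := by simpa using h1
            have h2' : p.2 = a := by simpa using h2
            exact Prod.ext this h2'
        | succ k =>
            right
            exact ⟨k, by simp only [List.length_cons] at hk; omega, by rw [h1]; push_cast; ring, by simpa using h2⟩

theorem pv_getElem_enumerate {α : Type} (xs : List α) (s : Int) (k : Nat) (hk : k < xs.length) :
    (PySem.List.enumerate xs s)[k]'(by simpa [PySem.List.length_enumerate] using hk) = (s + k, xs[k]) := by
  induction xs generalizing s k with
  | nil => simp at hk
  | cons a rest ih =>
      cases k with
      | zero => simp [PySem.List.enumerate_cons]
      | succ k =>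
          have hk' : k < rest.length := by simpa using hk
          have hih := ih (s + 1) k hk'
          simp only [PySem.List.enumerate_cons, List.getElem_cons_succ, hih]
          exact Prod.ext (by push_cast; ring) rfl

theorem pv_foldl_triple {α β γ δ : Type} (l : List δ) (g1 : α → δ → α) (g2 : β → δ → β)
    (g3 : γ → δ → γ) (a : α) (b : β) (c : γ) :
    l.foldl (fun acc x => (g1 acc.1 x, g2 acc.2.1 x, g3 acc.2.2 x)) (a, b, c)
      = (l.foldl g1 a, l.foldl g2 b, l.foldl g3 c) := by
  induction l generalizing a b c with
  | nil => rfl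
  | cons x rest ih => simp [ih]

-- ---- facts about the key lists ----
theorem pv_length_K (state : List Int) : (pvK state).length = state.length := by
  simp [pvK, PySem.List.length_enumerate]

theorem pv_length_K' (state : List Int) : (pvK' state).length = state.length := by
  simp [pvK', PySem.List.length_enumerate]

theorem pv_getElem_K (state : List Int) (k : Nat) (hk : k < state.length) :
    (pvK state)[k]'(by rw [pv_length_K]; exact hk) = (k : Int) + state[k] := by
  simp [pvK, pv_getElem_enumerate state 0 k hk]

theorem pv_getElem_K' (state : List Int) (k : Nat) (hk : k < state.length) :
    (pvK' state)[k]'(by rw [pv_length_K']; exact hk) = (k : Int) - state[k] := by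
  simp [pvK', pv_getElem_enumerate state 0 k hk]

-- ---- A-side characterizations ----
theorem pv_mem_pvAdd2 (hits : List Int) (col j x : Int) :
    x ∈ pvAdd2 hits col j ↔ x ∈ hits ∨ x = col ∨ x = j := by
  unfold pvAdd2
  by_cases h1 : col ∈ hits <;> simp only [h1, if_true, if_false] <;>
    split_ifs <;> simp_all <;> aesop

theorem pv_nodup_pvAdd2 (hits : List Int) (col j : Int) (h : hits.Nodup) :
    (pvAdd2 hits col j).Nodup := by
  unfold pvAdd2
  by_cases h1 : col ∈ hits <;> simp only [h1, if_true, if_false] <;>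
    split_ifs <;> simp_all [List.nodup_append, List.nodup_cons] <;> aesop

def pvRowAdd (state : List Int) (c x : Int) : Prop :=
  ∃ j, (PySem.List.pyRange (c + 1) state.length 1).find?
        (fun j => decide (PySem.List.pyGetD state c 0 = PySem.List.pyGetD state j 0)) = some j
      ∧ (x = c ∨ x = j)

def pvDiagAdd (state : List Int) (c x : Int) : Prop :=
  ∃ j ∈ PySem.List.pyRange (c + 1) state.length 1,
    (c + PySem.List.pyGetD state c 0 = j + PySem.List.pyGetD state j 0
      ∨ c - PySem.List.pyGetD state c 0 = j - PySem.List.pyGetD state j 0)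
    ∧ (x = c ∨ x = j)

theorem pv_mem_pvRowInner (state : List Int) (col : Int) (js : List Int) (hits : List Int) (x : Int) :
    x ∈ pvRowInner state col js hits ↔ x ∈ hits ∨
      ∃ j, js.find? (fun j => decide (PySem.List.pyGetD state col 0 = PySem.List.pyGetD state j 0)) = some j
        ∧ (x = col ∨ x = j) := by
  induction js with
  | nil => simp [pvRowInner]
  | cons j rest ih =>
      by_cases hp : PySem.List.pyGetD state col 0 = PySem.List.pyGetD state j 0
      · simp [pvRowInner, hp, pv_mem_pvAdd2]
      · simp [pvRowInner, hp, ih]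

theorem pv_nodup_pvRowInner (state : List Int) (col : Int) (js : List Int) (hits : List Int)
    (h : hits.Nodup) : (pvRowInner state col js hits).Nodup := by
  induction js with
  | nil => simpa [pvRowInner]
  | cons j rest ih =>
      by_cases hp : PySem.List.pyGetD state col 0 = PySem.List.pyGetD state j 0
      · simpa [pvRowInner, hp] using pv_nodup_pvAdd2 hits col j h
      · simpa [pvRowInner, hp] using ih

theorem pv_mem_pvDiagInner (state : List Int) (col : Int) (js : List Int) (hits : List Int) (x : Int) :
    x ∈ pvDiagInner state col js hits ↔ x ∈ hits ∨
      ∃ j ∈ js, (col + PySem.List.pyGetD state col 0 = j + PySem.List.pyGetD state j 0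
          ∨ col - PySem.List.pyGetD state col 0 = j - PySem.List.pyGetD state j 0)
        ∧ (x = col ∨ x = j) := by
  induction js generalizing hits with
  | nil => simp [pvDiagInner]
  | cons j rest ih =>
      by_cases hp : col + PySem.List.pyGetD state col 0 = j + PySem.List.pyGetD state j 0
          ∨ col - PySem.List.pyGetD state col 0 = j - PySem.List.pyGetD state j 0
      · simp only [pvDiagInner, if_pos hp, ih, pv_mem_pvAdd2, List.mem_cons]
        constructor
        · rintro ((hx | hx | hx) | ⟨j', hj', hc, hx⟩)
          · exact Or.inl hx
          · exact Or.inr ⟨j, Or.inl rfl, hp, Or.inl hx⟩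
          · exact Or.inr ⟨j, Or.inl rfl, hp, Or.inr hx⟩
          · exact Or.inr ⟨j', Or.inr hj', hc, hx⟩
        · rintro (hx | ⟨j', hj' | hj', hc, hx⟩)
          · exact Or.inl (Or.inl hx)
          · subst hj'; exact Or.inl (Or.inr hx)
          · exact Or.inr ⟨j', hj', hc, hx⟩
      · simp only [pvDiagInner, if_neg hp, ih, List.mem_cons]
        constructor
        · rintro (hx | ⟨j', hj', hc, hx⟩)
          · exact Or.inl hx
          · exact Or.inr ⟨j', Or.inr hj', hc, hx⟩
        · rintro (hx | ⟨j', hj' | hj', hc, hx⟩)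
          · exact Or.inl hx
          · exact absurd (hj' ▸ hc) hp
          · exact Or.inr ⟨j', hj', hc, hx⟩

theorem pv_nodup_pvDiagInner (state : List Int) (col : Int) (js : List Int) (hits : List Int)
    (h : hits.Nodup) : (pvDiagInner state col js hits).Nodup := by
  induction js generalizing hits with
  | nil => simpa [pvDiagInner]
  | cons j rest ih =>
      by_cases hp : col + PySem.List.pyGetD state col 0 = j + PySem.List.pyGetD state j 0
          ∨ col - PySem.List.pyGetD state col 0 = j - PySem.List.pyGetD state j 0
      · simpa [pvDiagInner, if_pos hp] using ih _ (pv_nodup_pvAdd2 hits col j h)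
      · simpa [pvDiagInner, if_neg hp] using ih _ h

theorem pv_get_nat (state : List Int) (k : Nat) (hk : k < state.length) :
    PySem.List.pyGetD state (k : Int) 0 = state[k] := by
  rw [PySem.List.pyGetD_eq_getElem state 0 (by exact_mod_cast Int.natCast_nonneg k)
      (by exact_mod_cast hk)]
  simp

theorem pv_get_int (state : List Int) (c : Int) (h0 : 0 ≤ c) (h1 : c < state.length) :
    PySem.List.pyGetD state c 0 = state[c.toNat]'(by omega) := by
  rw [PySem.List.pyGetD_eq_getElem state 0 h0 h1]

-- the pairwise row condition, over natural indices
theorem pv_row_char (state : List Int) (x : Int) :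
    (∃ c ∈ PySem.List.pyRange 0 (state.length : Int) 1, pvRowAdd state c x) ↔
      ∃ k : Nat, ∃ hk : k < state.length, x = (k : Int) ∧
        ∃ j, ∃ hj : j < state.length, j ≠ k ∧ state[j] = state[k] := by
  constructor
  · rintro ⟨c, hc, j, hfind, hx⟩
    have hcr := (PySem.List.mem_pyRange_one).mp hc
    have hjr := (PySem.List.mem_pyRange_one).mp (List.mem_of_find?_eq_some hfind)
    have hpred := List.find?_some hfind
    rw [decide_eq_true_eq] at hpred
    have hcn : c.toNat < state.length := by omega
    have hjn : j.toNat < state.length := by omega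
    rw [pv_get_int state c (by omega) (by omega), pv_get_int state j (by omega) (by omega)] at hpred
    rcases hx with rfl | rfl
    · exact ⟨x.toNat, hcn, by omega, j.toNat, hjn, by omega, hpred.symm⟩
    · exact ⟨x.toNat, hjn, by omega, c.toNat, hcn, by omega, hpred⟩
  · rintro ⟨k, hk, rfl, j, hj, hne, heq⟩
    by_cases hafter : ∃ m : Nat, ∃ hm : m < state.length, k < m ∧ state[m] = state[k]
    · rcases hafter with ⟨m, hm, hkm, hmeq⟩
      refine ⟨(k : Int), PySem.List.mem_pyRange_one.mpr ⟨by omega, by exact_mod_cast hk⟩, ?_⟩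
      have hmem : (m : Int) ∈ PySem.List.pyRange ((k : Int) + 1) (state.length : Int) 1 :=
        PySem.List.mem_pyRange_one.mpr ⟨by omega, by exact_mod_cast hm⟩
      have hpm : (decide (PySem.List.pyGetD state (k : Int) 0 = PySem.List.pyGetD state (m : Int) 0)) = true := by
        rw [decide_eq_true_eq, pv_get_nat state k hk, pv_get_nat state m hm]
        exact hmeq.symm
      have hsome : ((PySem.List.pyRange ((k : Int) + 1) (state.length : Int) 1).find?
          (fun j => decide (PySem.List.pyGetD state (k : Int) 0 = PySem.List.pyGetD state j 0))).isSome := by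
        rw [List.find?_isSome]
        exact ⟨(m : Int), hmem, hpm⟩
      rcases Option.isSome_iff_exists.mp hsome with ⟨b, hb⟩
      exact ⟨b, hb, Or.inl rfl⟩
    · have hjk : j < k := by
        rcases Nat.lt_or_ge j k with h | h
        · exact h
        · exact absurd ⟨j, hj, by omega, heq⟩ hafter
      have hk1 : 1 ≤ k := by omega
      set P : Nat → Prop := fun m => m < state.length ∧ state.getD m 0 = state.getD k 0 with hP
      have hPdec : DecidablePred P := fun m => by rw [hP]; infer_instance
      have hPj : P j := ⟨by omega, by rw [List.getD_eq_getElem _ _ hj, List.getD_eq_getElem _ _ hk]; exact heq⟩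
      have hPp : P (Nat.findGreatest P (k - 1)) := Nat.findGreatest_spec (m := j) (by omega) hPj
      set p := Nat.findGreatest P (k - 1) with hpdef
      have hpk : p ≤ k - 1 := Nat.findGreatest_le _
      have hpn : p < state.length := hPp.1
      have hpeq : state[p]'hpn = state[k] := by
        have := hPp.2
        rwa [List.getD_eq_getElem _ _ hpn, List.getD_eq_getElem _ _ hk] at this
      have hfind : (PySem.List.pyRange ((p : Int) + 1) (state.length : Int) 1).find?
          (fun j => decide (PySem.List.pyGetD state (p : Int) 0 = PySem.List.pyGetD state j 0)) = some (k : Int) := by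
        apply pv_find?_eq_of_unique
        · exact PySem.List.mem_pyRange_one.mpr ⟨by omega, by exact_mod_cast hk⟩
        · rw [decide_eq_true_eq, pv_get_nat state p hpn, pv_get_nat state k hk]
          exact hpeq
        · intro y hy hpy
          have hyr := PySem.List.mem_pyRange_one.mp hy
          rw [decide_eq_true_eq, pv_get_nat state p hpn,
            pv_get_int state y (by omega) (by omega)] at hpy
          have hyn : y.toNat < state.length := by omega
          have hyeq : state[y.toNat]'hyn = state[k] := by rw [← hpy, hpeq]
          by_contra hyk
          rcases Nat.lt_or_ge y.toNat k with h | h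
          · have hPy : P y.toNat := ⟨hyn, by
              rw [List.getD_eq_getElem _ _ hyn, List.getD_eq_getElem _ _ hk]; exact hyeq⟩
            exact Nat.findGreatest_is_greatest (n := k - 1)
              (show Nat.findGreatest P (k - 1) < y.toNat by omega) (by omega) hPy
          · have : k < y.toNat := by omega
            exact hafter ⟨y.toNat, hyn, this, hyeq⟩
      exact ⟨(p : Int), PySem.List.mem_pyRange_one.mpr ⟨by omega, by exact_mod_cast (by omega : p < state.length)⟩,
        (k : Int), hfind, Or.inr rfl⟩

theorem pv_diag_char (state : List Int) (x : Int) :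
    (∃ c ∈ PySem.List.pyRange 0 (state.length : Int) 1, pvDiagAdd state c x) ↔
      ∃ k : Nat, ∃ hk : k < state.length, x = (k : Int) ∧
        ∃ j, ∃ hj : j < state.length, j ≠ k ∧
          ((j : Int) + state[j] = (k : Int) + state[k]
            ∨ (j : Int) - state[j] = (k : Int) - state[k]) := by
  constructor
  · rintro ⟨c, hc, j, hjm, hcond, hx⟩
    have hcr := (PySem.List.mem_pyRange_one).mp hc
    have hjr := (PySem.List.mem_pyRange_one).mp hjm
    have hcn : c.toNat < state.length := by omega
    have hjn : j.toNat < state.length := by omega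
    rw [pv_get_int state c (by omega) (by omega), pv_get_int state j (by omega) (by omega)] at hcond
    rcases hx with rfl | rfl
    · refine ⟨x.toNat, hcn, by omega, j.toNat, hjn, by omega, ?_⟩
      rcases hcond with h | h
      · left; rw [Int.toNat_of_nonneg (by omega : (0:Int) ≤ x), Int.toNat_of_nonneg (by omega : (0:Int) ≤ j)] at *; omega
      · right; rw [Int.toNat_of_nonneg (by omega : (0:Int) ≤ x), Int.toNat_of_nonneg (by omega : (0:Int) ≤ j)] at *; omega
    · refine ⟨x.toNat, hjn, by omega, c.toNat, hcn, by omega, ?_⟩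
      rcases hcond with h | h
      · left; rw [Int.toNat_of_nonneg (by omega : (0:Int) ≤ x), Int.toNat_of_nonneg (by omega : (0:Int) ≤ c)] at *; omega
      · right; rw [Int.toNat_of_nonneg (by omega : (0:Int) ≤ x), Int.toNat_of_nonneg (by omega : (0:Int) ≤ c)] at *; omega
  · rintro ⟨k, hk, rfl, j, hj, hne, hcond⟩
    rcases Nat.lt_or_ge j k with hjk | hkj
    · refine ⟨(j : Int), PySem.List.mem_pyRange_one.mpr ⟨by omega, by exact_mod_cast hj⟩,
        (k : Int), PySem.List.mem_pyRange_one.mpr ⟨by omega, by exact_mod_cast hk⟩, ?_, Or.inr rfl⟩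
      rw [pv_get_nat state j hj, pv_get_nat state k hk]
      exact hcond
    · have hkj' : k < j := by omega
      refine ⟨(k : Int), PySem.List.mem_pyRange_one.mpr ⟨by omega, by exact_mod_cast hk⟩,
        (j : Int), PySem.List.mem_pyRange_one.mpr ⟨by omega, by exact_mod_cast hj⟩, ?_, Or.inl rfl⟩
      rw [pv_get_nat state k hk, pv_get_nat state j hj]
      rcases hcond with h | h
      · exact Or.inl h.symm
      · exact Or.inr h.symm

theorem pv_predp_char (state : List Int) (x : Int) :
    (∃ p ∈ PySem.List.enumerate state 0, pvPredp state p = true ∧ x = p.1) ↔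
      ∃ k : Nat, ∃ hk : k < state.length, x = (k : Int) ∧
        (2 ≤ state.count state[k] ∨ 2 ≤ (pvK state).count ((k : Int) + state[k])
          ∨ 2 ≤ (pvK' state).count ((k : Int) - state[k])) := by
  constructor
  · rintro ⟨p, hp, hpred, rfl⟩
    rcases (pv_mem_enumerate state 0 p).mp hp with ⟨k, hk, h1, h2⟩
    refine ⟨k, hk, by omega, ?_⟩
    simp only [pvPredp, Bool.or_eq_true, decide_eq_true_eq, h1, h2] at hpred
    simp only [zero_add] at hpred
    tauto
  · rintro ⟨k, hk, rfl, hcnt⟩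
    refine ⟨((k : Int), state[k]), (pv_mem_enumerate state 0 _).mpr ⟨k, hk, by simp, rfl⟩, ?_, rfl⟩
    simp only [pvPredp, Bool.or_eq_true, decide_eq_true_eq]
    tauto

theorem pv_cnt_anti (state : List Int) (k : Nat) (hk : k < state.length) :
    2 ≤ (pvK state).count ((k : Int) + state[k]) ↔
      ∃ j, ∃ hj : j < state.length, j ≠ k ∧ (j : Int) + state[j] = (k : Int) + state[k] := by
  have hkK : k < (pvK state).length := by rw [pv_length_K]; exact hk
  have h := pv_two_le_count_iff (pvK state) k hkK
  rw [pv_getElem_K state k hk] at h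
  rw [h]
  constructor
  · rintro ⟨j, hj, hne, he⟩
    have hj' : j < state.length := by rwa [pv_length_K] at hj
    rw [pv_getElem_K state j hj'] at he
    exact ⟨j, hj', hne, he⟩
  · rintro ⟨j, hj, hne, he⟩
    have hj' : j < (pvK state).length := by rwa [pv_length_K]
    exact ⟨j, hj', hne, by rw [pv_getElem_K state j hj]; exact he⟩

theorem pv_cnt_diag (state : List Int) (k : Nat) (hk : k < state.length) :
    2 ≤ (pvK' state).count ((k : Int) - state[k]) ↔
      ∃ j, ∃ hj : j < state.length, j ≠ k ∧ (j : Int) - state[j] = (k : Int) - state[k] := by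
  have hkK : k < (pvK' state).length := by rw [pv_length_K']; exact hk
  have h := pv_two_le_count_iff (pvK' state) k hkK
  rw [pv_getElem_K' state k hk] at h
  rw [h]
  constructor
  · rintro ⟨j, hj, hne, he⟩
    have hj' : j < state.length := by rwa [pv_length_K'] at hj
    rw [pv_getElem_K' state j hj'] at he
    exact ⟨j, hj', hne, he⟩
  · rintro ⟨j, hj, hne, he⟩
    have hj' : j < (pvK' state).length := by rwa [pv_length_K']
    exact ⟨j, hj', hne, by rw [pv_getElem_K' state j hj]; exact he⟩

-- membership in A's final hits list = the counting predicate
theorem pv_A_char (state : List Int) (x : Int) :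
    (x ∈ (PySem.List.pyRange 0 (state.length : Int) 1).foldl
        (fun hits col => pvDiagInner state col (PySem.List.pyRange (col + 1) (state.length : Int) 1) hits)
        ((PySem.List.pyRange 0 (state.length : Int) 1).foldl
          (fun hits col => pvRowInner state col (PySem.List.pyRange (col + 1) (state.length : Int) 1) hits) []))
    ↔ ∃ p ∈ PySem.List.enumerate state 0, pvPredp state p = true ∧ x = p.1 := by
  rw [pv_foldl_mem_iff _ (pvDiagAdd state) (fun acc c x => pv_mem_pvDiagInner state c _ acc x),
      pv_foldl_mem_iff _ (pvRowAdd state) (fun acc c x => pv_mem_pvRowInner state c _ acc x)]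
  simp only [List.not_mem_nil, false_or]
  rw [pv_row_char, pv_diag_char, pv_predp_char]
  constructor
  · rintro (⟨k, hk, rfl, j, hj, hne, heq⟩ | ⟨k, hk, rfl, j, hj, hne, h | h⟩)
    · exact ⟨k, hk, rfl, Or.inl ((pv_two_le_count_iff state k hk).mpr ⟨j, hj, hne, heq⟩)⟩
    · exact ⟨k, hk, rfl, Or.inr (Or.inl ((pv_cnt_anti state k hk).mpr ⟨j, hj, hne, h⟩))⟩
    · exact ⟨k, hk, rfl, Or.inr (Or.inr ((pv_cnt_diag state k hk).mpr ⟨j, hj, hne, h⟩))⟩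
  · rintro ⟨k, hk, rfl, h | h | h⟩
    · rcases (pv_two_le_count_iff state k hk).mp h with ⟨j, hj, hne, heq⟩
      exact Or.inl ⟨k, hk, rfl, j, hj, hne, heq⟩
    · rcases (pv_cnt_anti state k hk).mp h with ⟨j, hj, hne, heq⟩
      exact Or.inr ⟨k, hk, rfl, j, hj, hne, Or.inl heq⟩
    · rcases (pv_cnt_diag state k hk).mp h with ⟨j, hj, hne, heq⟩
      exact Or.inr ⟨k, hk, rfl, j, hj, hne, Or.inr heq⟩

theorem pv_A_nodup (state : List Int) :
    ((PySem.List.pyRange 0 (state.length : Int) 1).foldl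
        (fun hits col => pvDiagInner state col (PySem.List.pyRange (col + 1) (state.length : Int) 1) hits)
        ((PySem.List.pyRange 0 (state.length : Int) 1).foldl
          (fun hits col => pvRowInner state col (PySem.List.pyRange (col + 1) (state.length : Int) 1) hits) [])).Nodup := by
  apply pv_foldl_nodup _ (fun acc c h => pv_nodup_pvDiagInner state c _ acc h)
  apply pv_foldl_nodup _ (fun acc c h => pv_nodup_pvRowInner state c _ acc h)
  exact List.nodup_nil

theorem pv_f_eq_countP (state : List Int) :
    f state = ((PySem.List.enumerate state 0).countP (pvPredp state) : Int) := by
  simp only [f]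
  have hnodup := pv_A_nodup state
  have hchar := pv_A_char state
  set T := ((PySem.List.enumerate state 0).filter (pvPredp state)).map (fun p => p.1) with hT
  have hTnodup : T.Nodup := by
    refine List.Nodup.sublist (List.Sublist.map _ List.filter_sublist) ?_
    rw [show (fun p : Int × Int => p.1) = (fun p : Int × Int => p.1) from rfl,
      PySem.List.map_fst_enumerate]
    exact PySem.List.nodup_pyRange_one _ _
  have hmemT : ∀ y : Int, y ∈ T ↔
      ∃ p ∈ PySem.List.enumerate state 0, pvPredp state p = true ∧ y = p.1 := by
    intro y
    simp only [hT, List.mem_map, List.mem_filter]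
    constructor
    · rintro ⟨a, ⟨ha, hpa⟩, rfl⟩
      exact ⟨a, ha, hpa, rfl⟩
    · rintro ⟨a, ha, hpa, rfl⟩
      exact ⟨a, ⟨ha, hpa⟩, rfl⟩
  have hperm := (List.perm_ext_iff_of_nodup hnodup hTnodup).mpr
    (fun a => (hchar a).trans ((hmemT a).symm))
  rw [hperm.length_eq]
  simp [hT, List.countP_eq_length_filter]

theorem pv_split3 (state : List Int) :
    (PySem.List.enumerate state 0).foldl
      (fun acc p =>
        (acc.1.insert p.2 (acc.1.getD p.2 0 + 1),
         acc.2.1.insert (p.1 + p.2) (acc.2.1.getD (p.1 + p.2) 0 + 1),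
         acc.2.2.insert (p.1 - p.2) (acc.2.2.getD (p.1 - p.2) 0 + 1)))
      ((PySem.Dict.empty : PySem.Dict Int Int), (PySem.Dict.empty : PySem.Dict Int Int),
       (PySem.Dict.empty : PySem.Dict Int Int))
    = ((PySem.List.enumerate state 0).foldl
         (fun d p => d.insert p.2 (d.getD p.2 0 + 1)) PySem.Dict.empty,
       (PySem.List.enumerate state 0).foldl
         (fun d p => d.insert (p.1 + p.2) (d.getD (p.1 + p.2) 0 + 1)) PySem.Dict.empty,
       (PySem.List.enumerate state 0).foldl
         (fun d p => d.insert (p.1 - p.2) (d.getD (p.1 - p.2) 0 + 1)) PySem.Dict.empty) :=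
  pv_foldl_triple (PySem.List.enumerate state 0)
    (fun (d : PySem.Dict Int Int) (p : Int × Int) => d.insert p.2 (d.getD p.2 0 + 1))
    (fun (d : PySem.Dict Int Int) (p : Int × Int) => d.insert (p.1 + p.2) (d.getD (p.1 + p.2) 0 + 1))
    (fun (d : PySem.Dict Int Int) (p : Int × Int) => d.insert (p.1 - p.2) (d.getD (p.1 - p.2) 0 + 1)) _ _ _

theorem pv_f_alt_eq_countP (state : List Int) :
    f_alt state = ((PySem.List.enumerate state 0).countP (pvPredp state) : Int) := by
  simp only [f_alt]
  rw [pv_split3]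
  have hrows : (PySem.List.enumerate state 0).foldl
      (fun (d : PySem.Dict Int Int) p => d.insert p.2 (d.getD p.2 0 + 1)) PySem.Dict.empty
      = PySem.Dict.counter state := by
    have h1 : ((PySem.List.enumerate state 0).map (fun p => p.2)).foldl
        (fun (d : PySem.Dict Int Int) v => d.insert v (d.getD v 0 + 1)) PySem.Dict.empty
        = (PySem.List.enumerate state 0).foldl
            (fun (d : PySem.Dict Int Int) p => d.insert p.2 (d.getD p.2 0 + 1)) PySem.Dict.empty :=
      List.foldl_map
    rw [← h1, PySem.List.map_snd_enumerate, PySem.Dict.foldl_insert_getD_add_one_eq_counter]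
  have hanti : (PySem.List.enumerate state 0).foldl
      (fun (d : PySem.Dict Int Int) p => d.insert (p.1 + p.2) (d.getD (p.1 + p.2) 0 + 1)) PySem.Dict.empty
      = PySem.Dict.counter (pvK state) := by
    have h1 : ((PySem.List.enumerate state 0).map (fun p => p.1 + p.2)).foldl
        (fun (d : PySem.Dict Int Int) v => d.insert v (d.getD v 0 + 1)) PySem.Dict.empty
        = (PySem.List.enumerate state 0).foldl
            (fun (d : PySem.Dict Int Int) p => d.insert (p.1 + p.2) (d.getD (p.1 + p.2) 0 + 1))
            PySem.Dict.empty :=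
      List.foldl_map
    rw [← h1, PySem.Dict.foldl_insert_getD_add_one_eq_counter]
    rfl
  have hdiag : (PySem.List.enumerate state 0).foldl
      (fun (d : PySem.Dict Int Int) p => d.insert (p.1 - p.2) (d.getD (p.1 - p.2) 0 + 1)) PySem.Dict.empty
      = PySem.Dict.counter (pvK' state) := by
    have h1 : ((PySem.List.enumerate state 0).map (fun p => p.1 - p.2)).foldl
        (fun (d : PySem.Dict Int Int) v => d.insert v (d.getD v 0 + 1)) PySem.Dict.empty
        = (PySem.List.enumerate state 0).foldl
            (fun (d : PySem.Dict Int Int) p => d.insert (p.1 - p.2) (d.getD (p.1 - p.2) 0 + 1))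
            PySem.Dict.empty :=
      List.foldl_map
    rw [← h1, PySem.Dict.foldl_insert_getD_add_one_eq_counter]
    rfl
  simp only [hrows, hanti, hdiag]
  have hfun : (fun (s : Int) (p : Int × Int) =>
      if 1 < (PySem.Dict.counter state).getD p.2 0
          ∨ 1 < (PySem.Dict.counter (pvK state)).getD (p.1 + p.2) 0
          ∨ 1 < (PySem.Dict.counter (pvK' state)).getD (p.1 - p.2) 0
      then s + 1 else s)
      = (fun (s : Int) (p : Int × Int) => if pvPredp state p = true then s + 1 else s) := by
    funext s p
    by_cases h : pvPredp state p = true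
    · rw [if_pos h, if_pos ?_]
      simp only [pvPredp, Bool.or_eq_true, decide_eq_true_eq] at h
      simp only [PySem.Dict.getD_counter]
      omega
    · rw [if_neg ?_, if_neg h]
      simp only [pvPredp, Bool.or_eq_true, decide_eq_true_eq] at h
      simp only [PySem.Dict.getD_counter]
      push Not at h ⊢
      omega
  rw [hfun, PySem.List.foldl_count_if (pvPredp state) (PySem.List.enumerate state 0) 0]
  ring

-- ===== VERDICT (by name: the statement is the Claim_ definition above) =====
theorem f_spec : Claim_equal_f := by
  intro state _
  unfold Spec_f
  rw [pv_f_eq_countP, pv_f_alt_eq_countP]
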